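-- pv_equiv track=rewrite | github.com/CSA86/CSA86 | Configuracion voz.py | analiza_lag
-- ===== SOURCE A (Python) =====
-- def analiza_lag(informacion):
--     respuesta = {}
--     for orden, caso in enumerate(informacion):
--         caracteristicas_del_lag = []
--         if "lag" in caso:
--             lag = caso.strip()
--             fin_del_caso = False
--             next = orden
--             while not fin_del_caso:
--                 if next + 1 >= len(informacion) or "exit" in informacion[next + 1]:
--                     fin_del_caso = True
--                 else:
--                     next += 1
--                     a_archivar = informacion[next].strip()
--                     if "port " in a_archivar:
--                         a_archivar = a_archivar.split("port ")[-1].strip()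
--                     caracteristicas_del_lag.append(a_archivar)
--                     if 'no shutdown' in caracteristicas_del_lag:
--                         respuesta.update({lag: caracteristicas_del_lag})
--     return respuesta
-- ===== SOURCE B (Python) =====
-- def _archiva(linea):
--     s = linea.strip()
--     if "port " in s:
--         s = s.split("port ")[-1].strip()
--     return s
--
--
-- def analiza_lag(informacion):
--     n = len(informacion)
--     # boundary table: next_exit[i] = smallest j >= i with "exit" in informacion[j], else n
--     nx = n
--     next_exit = [n]
--     for i in range(n - 1, -1, -1):
--         if "exit" in informacion[i]:
--             nx = i
--         next_exit.append(nx)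
--     next_exit.reverse()
--     respuesta = {}
--     for i, caso in enumerate(informacion):
--         if "lag" in caso:
--             bloque = [_archiva(x) for x in informacion[i + 1 : next_exit[i + 1]]]
--             if "no shutdown" in bloque:
--                 respuesta[caso.strip()] = bloque
--     return respuesta
-- ===== Notes on version B (the rewrite author's own statement) =====
-- stated objective: alternative
-- what changed: Replaces A's per-lag stateful while-loop (flag variable, incremental membership re-check and repeated dict re-insertions of the growing list) with a precomputed next-exit boundary table built in one backward pass, a pure slice-and-map per lag line, and a single conditional insertion.
import Mathlib
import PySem

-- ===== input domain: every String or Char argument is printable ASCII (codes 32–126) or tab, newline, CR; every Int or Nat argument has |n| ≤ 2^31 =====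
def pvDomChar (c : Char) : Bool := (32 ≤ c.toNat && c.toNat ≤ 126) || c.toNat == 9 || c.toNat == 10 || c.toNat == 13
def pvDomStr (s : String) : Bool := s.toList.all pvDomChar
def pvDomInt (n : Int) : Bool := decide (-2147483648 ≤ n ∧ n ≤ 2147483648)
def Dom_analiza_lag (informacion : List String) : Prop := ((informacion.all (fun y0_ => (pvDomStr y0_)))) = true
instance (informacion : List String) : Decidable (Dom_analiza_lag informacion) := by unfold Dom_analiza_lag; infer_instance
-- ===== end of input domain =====

-- Alternative decomposition: A's per-lag stateful while-loop becomes a precomputed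
-- next-exit boundary table plus a pure slice-and-map with one conditional insertion.

-- ===== PORT A =====
-- inner while-loop of A: scans forward from `next`, appending transformed lines and
-- re-inserting the growing list whenever 'no shutdown' is a member
def analizaLoop (info : List String) (lag : String) (next : Nat) (carac : List String)
    (resp : PySem.Dict String (List String)) : List String × PySem.Dict String (List String) :=
  if next + 1 ≥ info.length ∨ PySem.Str.isIn "exit" (info.getD (next + 1) "") then
    (carac, resp)
  else
    let a0 := PySem.Str.strip (info.getD (next + 1) "")
    let a := if PySem.Str.isIn "port " a0 then
        PySem.Str.strip (PySem.List.pyGetD ((PySem.Str.split? a0 "port ").getD []) (-1) "")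
      else a0
    let carac' := carac ++ [a]
    let resp' := if "no shutdown" ∈ carac' then resp.insert lag carac' else resp
    analizaLoop info lag (next + 1) carac' resp'
termination_by info.length - next

def analiza_lag (informacion : List String) : List (String × List String) :=
  ((PySem.List.enumerate informacion 0).foldl
    (fun resp p =>
      if PySem.Str.isIn "lag" p.2 then
        (analizaLoop informacion (PySem.Str.strip p.2) p.1.toNat [] resp).2
      else resp)
    PySem.Dict.empty).items

-- ===== PORT B =====
def archiva (linea : String) : String :=
  let s := PySem.Str.strip linea
  if PySem.Str.isIn "port " s then
    PySem.Str.strip (PySem.List.pyGetD ((PySem.Str.split? s "port ").getD []) (-1) "")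
  else s

-- backward pass: next_exit[i] = smallest j >= i whose line contains "exit", else n
def nextExitTable (info : List String) : List Int :=
  let n : Int := info.length
  let st := (PySem.List.pyRange (n - 1) (-1) (-1)).foldl
    (fun (st : Int × List Int) i =>
      let nx := if PySem.Str.isIn "exit" (PySem.List.pyGetD info i "") then i else st.1
      (nx, st.2 ++ [nx]))
    (n, [n])
  st.2.reverse

def analiza_lag_alt (informacion : List String) : List (String × List String) :=
  let t := nextExitTable informacion
  ((PySem.List.enumerate informacion 0).foldl
    (fun resp p =>
      if PySem.Str.isIn "lag" p.2 then
        let bloque := (PySem.List.slice informacion (some (p.1 + 1))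
            (some (PySem.List.pyGetD t (p.1 + 1) 0))).map archiva
        if "no shutdown" ∈ bloque then resp.insert (PySem.Str.strip p.2) bloque else resp
      else resp)
    PySem.Dict.empty).items

-- ===== PRECONDITION & SPEC =====
def Spec_analiza_lag (informacion : List String) (out : List (String × List String)) : Prop := out = analiza_lag_alt informacion
instance (informacion : List String) (out : List (String × List String)) : Decidable (Spec_analiza_lag informacion out) := by unfold Spec_analiza_lag; infer_instance

-- ===== CLAIM (what is proved, stated in full; the proofs are below) =====
def Claim_equal_analiza_lag : Prop := ∀ (informacion : List String), Dom_analiza_lag informacion → Spec_analiza_lag informacion (analiza_lag informacion)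

-- ===== LEMMAS AND PROOFS =====

-- spec function: first index ≥ i whose line contains "exit", else length
def fe (info : List String) (i : Nat) : Nat :=
  if h : i < info.length then
    if PySem.Str.isIn "exit" info[i] then i else fe info (i + 1)
  else info.length
termination_by info.length - i

lemma fe_of_ge (info : List String) (i : Nat) (h : info.length ≤ i) : fe info i = info.length := by
  unfold fe; rw [dif_neg (by omega)]

lemma fe_of_exit (info : List String) (i : Nat) (h : i < info.length)
    (he : PySem.Str.isIn "exit" info[i] = true) : fe info i = i := by
  unfold fe; rw [dif_pos h, if_pos he]

lemma fe_of_not_exit (info : List String) (i : Nat) (h : i < info.length)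
    (he : ¬ PySem.Str.isIn "exit" info[i] = true) : fe info i = fe info (i + 1) := by
  conv_lhs => rw [fe]
  rw [dif_pos h, if_neg he]

lemma fe_ge (info : List String) (i : Nat) (hi : i ≤ info.length) : i ≤ fe info i := by
  by_cases h : i < info.length
  · by_cases he : PySem.Str.isIn "exit" info[i] = true
    · rw [fe_of_exit info i h he]
    · rw [fe_of_not_exit info i h he]
      have := fe_ge info (i + 1) (by omega)
      omega
  · rw [fe_of_ge info i (by omega)]; omega
termination_by info.length - i

lemma fe_le (info : List String) (i : Nat) : fe info i ≤ info.length := by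
  by_cases h : i < info.length
  · by_cases he : PySem.Str.isIn "exit" info[i] = true
    · rw [fe_of_exit info i h he]; omega
    · rw [fe_of_not_exit info i h he]
      exact fe_le info (i + 1)
  · rw [fe_of_ge info i (by omega)]
termination_by info.length - i

lemma insert_insert_self {ν : Type} (d : PySem.Dict String ν) (k : String) (v1 v2 : ν) :
    (d.insert k v1).insert k v2 = d.insert k v2 := by
  apply PySem.Dict.ext
  rw [PySem.Dict.items_insert, if_pos (PySem.Dict.contains_insert_self d k v1),
      PySem.Dict.items_insert, PySem.Dict.items_insert]
  by_cases hc : d.contains k = true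
  · rw [if_pos hc, if_pos hc, List.map_map]
    apply List.map_congr_left
    intro p _
    by_cases hp : p.1 = k <;> simp [hp]
  · rw [if_neg hc, if_neg hc, List.map_append]
    have hkeys : k ∉ d.keys := fun hmem => hc ((PySem.Dict.contains_iff_mem_keys d k).mpr hmem)
    have hne : ∀ p ∈ d.items, (p.1 == k) = false := by
      intro p hp
      rw [beq_eq_false_iff_ne]
      intro hEq
      apply hkeys
      simp only [PySem.Dict.keys]
      exact hEq ▸ List.mem_map_of_mem hp
    have h1 : d.items.map (fun p => if (p.1 == k) = true then (k, v2) else p) = d.items := by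
      have := List.map_congr_left (l := d.items)
        (f := fun p => if (p.1 == k) = true then (k, v2) else p) (g := id)
        (fun p hp => by simp [hne p hp])
      rw [this, List.map_id]
    have h2 : [(k, v1)].map (fun p => if (p.1 == k) = true then (k, v2) else p) = [(k, v2)] := by
      simp
    rw [h1, h2]

-- the transformed block that A's while-loop collects: lines from index i up to the
-- first "exit" line (exclusive), each passed through archiva
def bloqueOf (info : List String) (i : Nat) : List String :=
  ((info.drop i).take (fe info i - i)).map archiva

lemma bloqueOf_of_stop (info : List String) (i : Nat)
    (h : info.length ≤ i ∨ (∃ hi : i < info.length, PySem.Str.isIn "exit" info[i] = true)) :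
    bloqueOf info i = [] := by
  unfold bloqueOf
  rcases h with h | ⟨hi, he⟩
  · rw [List.drop_eq_nil_of_le (by omega)]; simp
  · rw [fe_of_exit info i hi he]; simp

lemma bloqueOf_cons (info : List String) (i : Nat) (hi : i < info.length)
    (he : ¬ PySem.Str.isIn "exit" info[i] = true) :
    bloqueOf info i = archiva info[i] :: bloqueOf info (i + 1) := by
  unfold bloqueOf
  rw [List.drop_eq_getElem_cons hi, fe_of_not_exit info i hi he]
  have h1 : fe info (i + 1) - i = (fe info (i + 1) - (i + 1)) + 1 := by
    have := fe_ge info (i + 1) (by omega); omega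
  rw [h1, List.take_succ_cons, List.map_cons]

-- characterisation of A's inner while-loop via bloqueOf
lemma inner_eq (info : List String) (lag : String) :
    ∀ (k next : Nat), info.length - next ≤ k → ∀ (c : List String) (r : PySem.Dict String (List String)),
    analizaLoop info lag next c r =
      (c ++ bloqueOf info (next + 1),
       if bloqueOf info (next + 1) = [] then r
       else if "no shutdown" ∈ c ++ bloqueOf info (next + 1) then
         r.insert lag (c ++ bloqueOf info (next + 1))
       else r) := by
  intro k
  induction k with
  | zero =>
    intro next hk c r
    have hstop : bloqueOf info (next + 1) = [] :=
      bloqueOf_of_stop info (next + 1) (Or.inl (by omega))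
    rw [hstop]
    unfold analizaLoop
    rw [if_pos (Or.inl (by omega))]
    simp
  | succ k ih =>
    intro next hk c r
    by_cases hg : next + 1 ≥ info.length ∨ PySem.Str.isIn "exit" (info.getD (next + 1) "") = true
    · have hstop : bloqueOf info (next + 1) = [] := by
        apply bloqueOf_of_stop
        rcases hg with hg | hg
        · exact Or.inl (by omega)
        · by_cases hlt : next + 1 < info.length
          · exact Or.inr ⟨hlt, by rwa [List.getD_eq_getElem info "" hlt] at hg⟩
          · exact Or.inl (by omega)
      rw [hstop]
      unfold analizaLoop
      rw [if_pos hg]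
      simp
    · push_neg at hg
      obtain ⟨hlt', hne⟩ := hg
      have hlt : next + 1 < info.length := by omega
      have hgd : info.getD (next + 1) "" = info[next + 1] := List.getD_eq_getElem info "" hlt
      rw [hgd] at hne
      have hcons := bloqueOf_cons info (next + 1) hlt hne
      -- unfold one step of the loop
      rw [analizaLoop]
      rw [if_neg (by rw [hgd]; push_neg; exact ⟨by omega, hne⟩)]
      have harch : (let a0 := PySem.Str.strip (info.getD (next + 1) "")
          if PySem.Str.isIn "port " a0 then
            PySem.Str.strip (PySem.List.pyGetD ((PySem.Str.split? a0 "port ").getD []) (-1) "")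
          else a0) = archiva info[next + 1] := by
        rw [hgd]; rfl
      simp only [harch]
      rw [ih (next + 1) (by omega)]
      set a := archiva info[next + 1] with ha
      set B' := bloqueOf info (next + 2) with hB'
      have hfull : (c ++ [a]) ++ B' = c ++ bloqueOf info (next + 1) := by
        rw [hcons]; simp
      rw [Prod.mk.injEq]
      refine ⟨hfull, ?_⟩
      · rw [hcons]
        rw [if_neg (by simp : ¬ (a :: B' = []))]
        have hfull2 : c ++ [a] ++ B' = c ++ a :: B' := by simp
        rw [hfull2]
        by_cases hb : B' = []
        · rw [if_pos hb, hb]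
        · rw [if_neg hb]
          by_cases hm : "no shutdown" ∈ c ++ a :: B'
          · rw [if_pos hm]
            by_cases hm1 : "no shutdown" ∈ c ++ [a]
            · rw [if_pos hm1, insert_insert_self, if_pos hm]
            · rw [if_neg hm1, if_pos hm]
          · rw [if_neg hm]
            have hm1 : ¬ "no shutdown" ∈ c ++ [a] := by
              intro hx
              apply hm
              rcases List.mem_append.mp hx with h | h
              · exact List.mem_append.mpr (Or.inl h)
              · simp at h; rw [h]; simp
            rw [if_neg hm1, if_neg hm]

-- characterisation of B's boundary table
lemma fold_char (info : List String) :
    ∀ (m : Nat), m ≤ info.length → ∀ (acc : List Int),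
    (PySem.List.pyRange ((m : Int) - 1) (-1) (-1)).foldl
      (fun (st : Int × List Int) i =>
        let nx := if PySem.Str.isIn "exit" (PySem.List.pyGetD info i "") then i else st.1
        (nx, st.2 ++ [nx]))
      ((fe info m : Int), acc)
    = ((fe info 0 : Int), acc ++ (List.range m).reverse.map (fun j => (fe info j : Int))) := by
  intro m
  induction m with
  | zero =>
    intro _ acc
    rw [PySem.List.pyRange_neg_one_eq_nil (by omega)]
    simp
  | succ m ih =>
    intro hm acc
    have hml : m < info.length := by omega
    have hgd : PySem.List.pyGetD info (m : Int) "" = info[m] :=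
      PySem.List.pyGetD_eq_getElem info "" (by omega) (by exact_mod_cast hml)
    rw [show (((m + 1 : Nat) : Int) - 1) = (m : Int) by push_cast; ring]
    rw [PySem.List.pyRange_neg_one_cons (by omega), List.foldl_cons]
    dsimp only
    rw [hgd]
    have hfe : (if PySem.Str.isIn "exit" info[m] = true then (m : Int) else (fe info (m + 1) : Int))
        = (fe info m : Int) := by
      split_ifs with he
      · rw [fe_of_exit info m hml he]
      · rw [fe_of_not_exit info m hml he]
    rw [hfe]
    rw [ih (by omega) (acc ++ [(fe info m : Int)])]
    rw [List.range_succ, List.reverse_append]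
    simp

lemma nextExitTable_eq (info : List String) :
    nextExitTable info = (List.range (info.length + 1)).map (fun j => (fe info j : Int)) := by
  unfold nextExitTable
  have h0 : ((info.length : Int)) = ((fe info info.length : Int)) := by
    rw [fe_of_ge info info.length (le_refl _)]
  simp only []
  rw [show ((info.length : Int), ([(info.length : Int)] : List Int))
      = ((fe info info.length : Int), [(fe info info.length : Int)]) by rw [← h0]]
  rw [fold_char info info.length (le_refl _) [(fe info info.length : Int)]]
  simp [List.range_succ]

lemma table_getD (info : List String) (k : Nat) (hk : k ≤ info.length) :
    PySem.List.pyGetD (nextExitTable info) ((k : Int)) 0 = (fe info k : Int) := by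
  rw [nextExitTable_eq]
  rw [PySem.List.pyGetD_eq_getElem _ 0 (by omega) (by simp; omega)]
  simp

-- ===== VERDICT (by name: the statement is the Claim_ definition above) =====
theorem analiza_lag_spec : Claim_equal_analiza_lag := by
  intro info _
  unfold Spec_analiza_lag analiza_lag analiza_lag_alt
  simp only []
  congr 1
  apply PySem.List.foldl_congr_mem
  intro resp p hp
  rcases (PySem.List.mem_enumerate_iff info 0 p).mp hp with ⟨k, hkl, hpk⟩
  subst hpk
  simp only [Int.zero_add]
  by_cases hl : PySem.Str.isIn "lag" info[k] = true
  · rw [if_pos hl, if_pos hl]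
    have ht : (k : Int).toNat = k := by omega
    rw [ht]
    rw [inner_eq info (PySem.Str.strip info[k]) (info.length - k) k (by omega) [] resp]
    have htab : PySem.List.pyGetD (nextExitTable info) ((k : Int) + 1) 0
        = (fe info (k + 1) : Int) := by
      rw [show ((k : Int) + 1) = ((k + 1 : Nat) : Int) by push_cast; ring]
      exact table_getD info (k + 1) (by omega)
    rw [htab]
    rw [show ((k : Int) + 1) = ((k + 1 : Nat) : Int) by push_cast; ring]
    rw [PySem.List.slice_natCast info (k + 1) (fe info (k + 1))]
    have hbl : (List.take (fe info (k + 1) - (k + 1)) (List.drop (k + 1) info)).map archiva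
        = bloqueOf info (k + 1) := rfl
    rw [hbl]
    simp only [List.nil_append]
    by_cases hb : bloqueOf info (k + 1) = []
    · rw [if_pos hb, hb]; simp
    · rw [if_neg hb]
  · rw [if_neg hl, if_neg hl]
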